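-- pv_equiv track=rewrite | github.com/agent-ilyusha/code_model | main.py | detective
-- ===== SOURCE A (Python) =====
-- from typing import List
--
-- def detective(code: str) -> List[str]:
--     """
--     this is code is search all code +- 1 vertical/horizontal line
--     :param code:
--     :return:
--     """
--     keyboard = [
--         ['1', '2', '3'],
--         ['4', '5', '6'],
--         ['7', '8', '9'],
--         ['', '0', '']
--     ]
--     code_set = list(sym for sym in code)
--     mb_code_list = list()  # mb -> may be
--     for sym_i, sym in enumerate(code_set):
--         for line_i, line in enumerate(keyboard):
--             code_list = list(code_set)
--             if sym in line:
--                 num_i = line.index(sym)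
--                 if num_i != 0 and num_i != 2 and line_i == 0:
--                     code_list[sym_i] = keyboard[line_i][num_i - 1]
--                     mb_code_list.append(''.join(code_list))
--
--                     code_list[sym_i] = keyboard[line_i + 1][num_i]
--                     mb_code_list.append(''.join(code_list))
--
--                     code_list[sym_i] = keyboard[line_i][num_i + 1]
--                     mb_code_list.append(''.join(code_list))
--
--                 if num_i != 0 and line_i != 0 and num_i != 2 and line_i != 3:
--                     code_list[sym_i] = keyboard[line_i - 1][num_i]
--                     mb_code_list.append(''.join(code_list))
--
--                     code_list[sym_i] = keyboard[line_i][num_i - 1]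
--                     mb_code_list.append(''.join(code_list))
--
--                     code_list[sym_i] = keyboard[line_i + 1][num_i]
--                     mb_code_list.append(''.join(code_list))
--
--                     code_list[sym_i] = keyboard[line_i][num_i + 1]
--                     mb_code_list.append(''.join(code_list))
--
--     return mb_code_list
-- ===== SOURCE B (Python) =====
-- from typing import List
--
-- # keyboard-adjacent replacements; only '2', '5', '8' have in-grid neighbours
-- # on all four sides / the three sides A's branch conditions admit
-- _ADJ = {'2': ['1', '5', '3'], '5': ['2', '4', '8', '6'], '8': ['5', '7', '0', '9']}
--
-- def detective(code: str) -> List[str]: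
--     variants = []
--     for i, ch in enumerate(code):
--         for rep in _ADJ.get(ch, []):
--             variants.append(code[:i] + rep + code[i + 1:])
--     return variants
-- ===== Notes on version B (the rewrite author's own statement) =====
-- stated objective: simpler
-- what changed: Replaces the keyboard-grid scan (inner loop over the four rows with line.index, two positional branch conditions, and a fresh char-list copy per row) by a precomputed adjacency dict mapping each of the three productive digits to its ordered replacement list, spliced in by string slicing in one flat pass.
import Mathlib
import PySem

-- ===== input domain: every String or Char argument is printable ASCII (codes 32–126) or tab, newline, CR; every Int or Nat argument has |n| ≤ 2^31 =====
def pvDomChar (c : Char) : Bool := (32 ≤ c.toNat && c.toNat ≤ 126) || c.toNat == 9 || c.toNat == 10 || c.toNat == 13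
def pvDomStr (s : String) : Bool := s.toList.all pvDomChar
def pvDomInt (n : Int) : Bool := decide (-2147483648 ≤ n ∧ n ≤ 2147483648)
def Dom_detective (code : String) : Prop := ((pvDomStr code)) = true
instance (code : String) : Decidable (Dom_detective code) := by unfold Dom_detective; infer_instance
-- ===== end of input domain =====

-- B replaces A's keyboard-grid scan (inner loop over rows + line.index + two branch conditions)
-- by a precomputed adjacency table looked up once per character: simpler, one flat pass.

-- ===== PORT A =====
def keyboardA : List (List String) := [["1", "2", "3"], ["4", "5", "6"], ["7", "8", "9"], ["", "0", ""]]

-- keyboard[li][ni]; every access A performs is in range (guarded by the branch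
-- conditions), so the `getD ""` default is never reached
def kbLookup (li ni : Int) : String :=
  ((PySem.List.pyGet? keyboardA li).bind (fun l => PySem.List.pyGet? l ni)).getD ""

-- one iteration of A's `for line_i, line in enumerate(keyboard)` body
def detLineStep (codeSet : List String) (symI : Int) (sym : String) (mb : List String)
    (q : Int × List String) : List String :=
  let lineI := q.1
  let line := q.2
  -- code_list = list(code_set); the in-place assignments become `List.set` on this copy
  if sym ∈ line then
    -- sym ∈ line, so line.index(sym) succeeds; the `getD 0` default is never reached
    let numI : Int := ((PySem.List.index? line sym).getD 0 : Nat)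
    let res :=
      if numI ≠ 0 ∧ numI ≠ 2 ∧ lineI = 0 then
        let cl := codeSet.set symI.toNat (kbLookup lineI (numI - 1))
        let mb := mb ++ [PySem.Str.join "" cl]
        let cl := cl.set symI.toNat (kbLookup (lineI + 1) numI)
        let mb := mb ++ [PySem.Str.join "" cl]
        let cl := cl.set symI.toNat (kbLookup lineI (numI + 1))
        (mb ++ [PySem.Str.join "" cl], cl)
      else (mb, codeSet)
    let mb := res.1
    let cl := res.2
    if numI ≠ 0 ∧ lineI ≠ 0 ∧ numI ≠ 2 ∧ lineI ≠ 3 then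
      let cl := cl.set symI.toNat (kbLookup (lineI - 1) numI)
      let mb := mb ++ [PySem.Str.join "" cl]
      let cl := cl.set symI.toNat (kbLookup lineI (numI - 1))
      let mb := mb ++ [PySem.Str.join "" cl]
      let cl := cl.set symI.toNat (kbLookup (lineI + 1) numI)
      let mb := mb ++ [PySem.Str.join "" cl]
      let cl := cl.set symI.toNat (kbLookup lineI (numI + 1))
      mb ++ [PySem.Str.join "" cl]
    else mb
  else mb

def detective (code : String) : List String :=
  let codeSet : List String := code.toList.map (fun c => String.ofList [c])
  (PySem.List.enumerate codeSet).foldl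
    (fun mb p => (PySem.List.enumerate keyboardA).foldl (detLineStep codeSet p.1 p.2) mb) []

-- ===== PORT B =====
def adjB : PySem.Dict Char (List Char) :=
  PySem.Dict.ofList [('2', ['1', '5', '3']), ('5', ['2', '4', '8', '6']), ('8', ['5', '7', '0', '9'])]

def detective_alt (code : String) : List String :=
  (PySem.List.enumerate code.toList).foldl
    (fun out p =>
      out ++ (PySem.Dict.getD adjB p.2 []).map (fun rep =>
        String.ofList (PySem.List.slice code.toList none (some p.1) ++ [rep] ++
          PySem.List.slice code.toList (some (p.1 + 1)) none))) []

-- ===== PRECONDITION & SPEC =====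
def Spec_detective (code : String) (out : List String) : Prop := out = detective_alt code
instance (code : String) (out : List String) : Decidable (Spec_detective code out) := by unfold Spec_detective; infer_instance

-- ===== CLAIM (what is proved, stated in full; the proofs are below) =====
def Claim_equal_detective : Prop := ∀ (code : String), Dom_detective code → Spec_detective code (detective code)

-- ===== LEMMAS AND PROOFS =====

-- A's per-symbol replacement list, read off from the keyboard grid
def aAdj (sym : String) : List Char :=
  if sym = "2" then ['1', '5', '3']
  else if sym = "5" then ['2', '4', '8', '6']
  else if sym = "8" then ['5', '7', '0', '9']
  else []

theorem enumerate_map {α β : Type} (f : α → β) (cs : List α) (k : Int) :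
    PySem.List.enumerate (cs.map f) k = (PySem.List.enumerate cs k).map (fun p => (p.1, f p.2)) := by
  induction cs generalizing k with
  | nil => rfl
  | cons c t ih => simp [PySem.List.enumerate, ih]

theorem mem_enumerate {α : Type} (cs : List α) (k : Int) (p : Int × α)
    (h : p ∈ PySem.List.enumerate cs k) :
    k ≤ p.1 ∧ (p.1 - k).toNat < cs.length ∧ cs[(p.1 - k).toNat]? = some p.2 := by
  induction cs generalizing k with
  | nil => simp [PySem.List.enumerate] at h
  | cons c t ih =>
      simp only [PySem.List.enumerate, List.mem_cons] at h
      rcases h with h | h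
      · subst h; simp
      · obtain ⟨h1, h2, h3⟩ := ih (k + 1) h
        refine ⟨by omega, ?_, ?_⟩
        · simp only [List.length_cons]; omega
        · have : (p.1 - k).toNat = (p.1 - (k + 1)).toNat + 1 := by omega
          rw [this]; simpa using h3

-- the inner keyboard loop, fully evaluated for every possible sym
theorem detLineStep_fold (codeSet : List String) (symI : Int) (sym : String) (mb : List String) :
    (PySem.List.enumerate keyboardA).foldl (detLineStep codeSet symI sym) mb
      = mb ++ (aAdj sym).map (fun rep => PySem.Str.join "" (codeSet.set symI.toNat (String.ofList [rep]))) := by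
  by_cases h2 : sym = "2"
  · subst h2
    have h : (PySem.List.enumerate keyboardA).foldl (detLineStep codeSet symI "2") mb
        = ((mb ++ [PySem.Str.join "" (codeSet.set symI.toNat (String.ofList ['1']))])
              ++ [PySem.Str.join "" ((codeSet.set symI.toNat (String.ofList ['1'])).set symI.toNat (String.ofList ['5']))])
              ++ [PySem.Str.join "" (((codeSet.set symI.toNat (String.ofList ['1'])).set symI.toNat (String.ofList ['5'])).set symI.toNat (String.ofList ['3']))] := rfl
    rw [h]; simp [aAdj, List.set_set]
  by_cases h5 : sym = "5"
  · subst h5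
    have h : (PySem.List.enumerate keyboardA).foldl (detLineStep codeSet symI "5") mb
        = (((mb ++ [PySem.Str.join "" (codeSet.set symI.toNat (String.ofList ['2']))])
              ++ [PySem.Str.join "" ((codeSet.set symI.toNat (String.ofList ['2'])).set symI.toNat (String.ofList ['4']))])
              ++ [PySem.Str.join "" (((codeSet.set symI.toNat (String.ofList ['2'])).set symI.toNat (String.ofList ['4'])).set symI.toNat (String.ofList ['8']))])
              ++ [PySem.Str.join "" ((((codeSet.set symI.toNat (String.ofList ['2'])).set symI.toNat (String.ofList ['4'])).set symI.toNat (String.ofList ['8'])).set symI.toNat (String.ofList ['6']))] := rfl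
    rw [h]; simp [aAdj, h2, List.set_set]
  by_cases h8 : sym = "8"
  · subst h8
    have h : (PySem.List.enumerate keyboardA).foldl (detLineStep codeSet symI "8") mb
        = (((mb ++ [PySem.Str.join "" (codeSet.set symI.toNat (String.ofList ['5']))])
              ++ [PySem.Str.join "" ((codeSet.set symI.toNat (String.ofList ['5'])).set symI.toNat (String.ofList ['7']))])
              ++ [PySem.Str.join "" (((codeSet.set symI.toNat (String.ofList ['5'])).set symI.toNat (String.ofList ['7'])).set symI.toNat (String.ofList ['0']))])
              ++ [PySem.Str.join "" ((((codeSet.set symI.toNat (String.ofList ['5'])).set symI.toNat (String.ofList ['7'])).set symI.toNat (String.ofList ['0'])).set symI.toNat (String.ofList ['9']))] := rfl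
    rw [h]; simp [aAdj, h2, h5, List.set_set]
  rw [show aAdj sym = [] from by simp [aAdj, h2, h5, h8], List.map_nil, List.append_nil]
  by_cases e1 : sym = "1"
  · subst e1; rfl
  by_cases e3 : sym = "3"
  · subst e3; rfl
  by_cases e4 : sym = "4"
  · subst e4; rfl
  by_cases e6 : sym = "6"
  · subst e6; rfl
  by_cases e7 : sym = "7"
  · subst e7; rfl
  by_cases e9 : sym = "9"
  · subst e9; rfl
  by_cases e0 : sym = "0"
  · subst e0; rfl
  by_cases ee : sym = ""
  · subst ee; rfl
  simp [show PySem.List.enumerate keyboardA = [((0:Int),["1","2","3"]),(1,["4","5","6"]),(2,["7","8","9"]),(3,["","0",""])] from rfl,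
        detLineStep, e1, h2, e3, e4, h5, e6, e7, h8, e9, e0, ee]

theorem ofList_eq_lit {c d : Char} (h : String.ofList [c] = String.ofList [d]) : c = d := by
  have := congrArg String.toList h; simpa using this

theorem aAdj_char (c : Char) : aAdj (String.ofList [c]) = PySem.Dict.getD adjB c [] := by
  by_cases h2 : c = '2'
  · subst h2; rfl
  by_cases h5 : c = '5'
  · subst h5; rfl
  by_cases h8 : c = '8'
  · subst h8; rfl
  have f2 : ('2' == c) = false := beq_eq_false_iff_ne.2 (Ne.symm h2)
  have f5 : ('5' == c) = false := beq_eq_false_iff_ne.2 (Ne.symm h5)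
  have f8 : ('8' == c) = false := beq_eq_false_iff_ne.2 (Ne.symm h8)
  have hi : adjB.items = [('2', ['1', '5', '3']), ('5', ['2', '4', '8', '6']), ('8', ['5', '7', '0', '9'])] := rfl
  rw [show aAdj (String.ofList [c]) = [] from by
    simp only [aAdj, if_neg (fun h => h2 (ofList_eq_lit h)), if_neg (fun h => h5 (ofList_eq_lit h)),
      if_neg (fun h => h8 (ofList_eq_lit h))]]
  simp [PySem.Dict.getD, PySem.Dict.get?, hi, List.find?, f2, f5, f8]

theorem join_singletons (l : List Char) :
    PySem.Str.join "" (l.map (fun c => String.ofList [c])) = String.ofList l := by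
  apply String.toList_inj.mp
  rw [PySem.Str.toList_join, List.map_map,
      show (String.toList ∘ fun c => String.ofList [c]) = fun c => [c] from funext fun c => by simp]
  rw [show ("" : String).toList = [] from rfl, PySem.Chars.join_nil_singletons]
  simp

theorem replace_at (cs : List Char) (n : Nat) (rep : Char) (hn : n < cs.length) :
    PySem.Str.join "" ((cs.map (fun c => String.ofList [c])).set n (String.ofList [rep]))
      = String.ofList (cs.take n ++ rep :: cs.drop (n + 1)) := by
  rw [← List.map_set, join_singletons, List.set_eq_take_cons_drop rep hn]

-- ===== VERDICT (by name: the statement is the Claim_ definition above) =====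
theorem detective_spec : Claim_equal_detective := by
  unfold Claim_equal_detective
  intro code _
  unfold Spec_detective detective detective_alt
  show (PySem.List.enumerate (code.toList.map (fun c => String.ofList [c]))).foldl
      (fun mb p => (PySem.List.enumerate keyboardA).foldl
        (detLineStep (code.toList.map (fun c => String.ofList [c])) p.1 p.2) mb) []
    = _
  have hbody : (fun (mb : List String) (p : Int × String) =>
      (PySem.List.enumerate keyboardA).foldl
        (detLineStep (code.toList.map (fun c => String.ofList [c])) p.1 p.2) mb)
      = fun mb p => mb ++ (aAdj p.2).map (fun rep =>
          PySem.Str.join "" ((code.toList.map (fun c => String.ofList [c])).set p.1.toNat (String.ofList [rep]))) :=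
    funext fun mb => funext fun p => detLineStep_fold _ p.1 p.2 mb
  rw [hbody, PySem.List.foldl_append_eq_flatMap, PySem.List.foldl_append_eq_flatMap,
      enumerate_map, List.flatMap_map]
  simp only [List.nil_append]
  apply List.flatMap_congr
  intro p hp
  obtain ⟨hk, hlt, hget⟩ := mem_enumerate code.toList 0 p hp
  simp only [Int.sub_zero] at hlt hget
  rw [aAdj_char]
  apply List.map_congr_left
  intro rep _
  rw [replace_at code.toList p.1.toNat rep hlt,
      PySem.List.slice_to code.toList hk, PySem.List.slice_from code.toList (by omega : (0:Int) ≤ p.1 + 1),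
      show (p.1 + 1).toNat = p.1.toNat + 1 from by omega]
  simp
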